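-- pv_equiv track=rewrite | github.com/cmbi/gold_standard | gold_standard_src/gold_standard/html_handler.py | get_full_seq_pos
-- ===== SOURCE A (Python) =====
-- def get_full_seq_pos(merged_corvar_seq, core_index):
--     c = 0
--     gaps = 0
--     for pos, res in enumerate(merged_corvar_seq):
--         if res == "-":
--             gaps += 1
--             c += 1
--         if not res.islower() and res != "-":
--             if c == core_index:
--                 return pos - gaps
--             c += 1
--     raise RuntimeError("Did not find full seq pos for core index %d in seq: %s" % (core_index, merged_corvar_seq))
-- ===== SOURCE B (Python) =====
-- def get_full_seq_pos(merged_corvar_seq, core_index):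
--     # Build the core-slot -> full-seq-position table in one pass, then do one lookup.
--     mapping = []
--     gaps = 0
--     for pos, res in enumerate(merged_corvar_seq):
--         if res == "-":
--             gaps += 1
--             mapping.append(None)
--         elif not res.islower():
--             mapping.append(pos - gaps)
--     if 0 <= core_index < len(mapping) and mapping[core_index] is not None:
--         return mapping[core_index]
--     raise RuntimeError("Did not find full seq pos for core index %d in seq: %s" % (core_index, merged_corvar_seq))
-- ===== Notes on version B (the rewrite author's own statement) =====
-- stated objective: alternative
-- what changed: B materializes the slot->position table (None sentinel for gap slots) in one pass and answers with a single bounds-checked indexed lookup, instead of A's two running counters with an in-loop early return.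
import Mathlib
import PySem

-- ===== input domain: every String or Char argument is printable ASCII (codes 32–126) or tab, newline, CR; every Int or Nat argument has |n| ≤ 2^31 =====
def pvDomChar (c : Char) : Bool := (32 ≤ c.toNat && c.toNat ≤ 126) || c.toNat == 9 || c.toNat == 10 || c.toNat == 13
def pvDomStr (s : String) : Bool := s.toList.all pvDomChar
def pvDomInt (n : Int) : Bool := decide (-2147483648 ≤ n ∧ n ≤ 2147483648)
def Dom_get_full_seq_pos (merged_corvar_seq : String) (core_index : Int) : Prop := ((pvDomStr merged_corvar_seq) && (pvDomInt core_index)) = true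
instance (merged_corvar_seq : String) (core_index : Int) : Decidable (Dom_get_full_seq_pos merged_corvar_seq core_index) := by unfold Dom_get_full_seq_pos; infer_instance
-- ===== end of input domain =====

-- B builds the slot→position table in one pass and answers with a single indexed lookup,
-- instead of A's two running counters with an in-loop early return (alternative decomposition, same cost).


-- ===== PORT A =====
-- A's loop: pos/c/gaps counters; returns pos - gaps when c hits core_index at a
-- non-lowercase, non-dash char. Where the Python raises, the port returns 0 (excluded by Pre_).
def goA : List Char → Int → Int → Int → Int → Int
  | [], _, _, _, _ => 0  -- loop ends: Python raises RuntimeError here (outside Pre_)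
  | r :: rest, pos, c, gaps, core =>
    let c' := if r = '-' then c + 1 else c
    let gaps' := if r = '-' then gaps + 1 else gaps
    if ¬ PySem.Str.islower r ∧ r ≠ '-' then
      if c' = core then pos - gaps'
      else goA rest (pos + 1) (c' + 1) gaps' core
    else goA rest (pos + 1) c' gaps' core

def get_full_seq_pos (merged_corvar_seq : String) (core_index : Int) : Int :=
  goA merged_corvar_seq.toList 0 0 0 core_index

-- ===== PORT B =====
-- builds the mapping list: None for a dash slot, (pos - gaps) for a non-lowercase slot
def buildMap : List Char → Int → Int → List (Option Int)
  | [], _, _ => []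
  | r :: rest, pos, gaps =>
    if r = '-' then none :: buildMap rest (pos + 1) (gaps + 1)
    else if ¬ PySem.Str.islower r then some (pos - gaps) :: buildMap rest (pos + 1) gaps
    else buildMap rest (pos + 1) gaps

def get_full_seq_pos_alt (merged_corvar_seq : String) (core_index : Int) : Int :=
  let m := buildMap merged_corvar_seq.toList 0 0
  if 0 ≤ core_index ∧ core_index < (m.length : Int) then
    match m[core_index.toNat]? with
    | some (some v) => v
    | _ => 0  -- dash slot or out of range: Python raises RuntimeError here (outside Pre_)
  else 0

-- ===== PRECONDITION & SPEC =====
-- Pre_: exactly the inputs on which Python A returns (no RuntimeError): some position holds a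
-- non-lowercase, non-dash char whose preceding count of dash-or-non-lowercase chars equals core_index.
def Pre_get_full_seq_pos (merged_corvar_seq : String) (core_index : Int) : Prop :=
  ∃ i : Fin merged_corvar_seq.toList.length,
    ¬ PySem.Str.islower merged_corvar_seq.toList[i] ∧ merged_corvar_seq.toList[i] ≠ '-' ∧
    (((merged_corvar_seq.toList.take i).filter
        (fun ch => ch = '-' ∨ ¬ PySem.Str.islower ch)).length : Int) = core_index
instance (merged_corvar_seq : String) (core_index : Int) : Decidable (Pre_get_full_seq_pos merged_corvar_seq core_index) := by unfold Pre_get_full_seq_pos; infer_instance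

def pvWitness_get_full_seq_pos : String × Int := ("a-B", 1)

def Spec_get_full_seq_pos (merged_corvar_seq : String) (core_index : Int) (out : Int) : Prop := out = get_full_seq_pos_alt merged_corvar_seq core_index
instance (merged_corvar_seq : String) (core_index : Int) (out : Int) : Decidable (Spec_get_full_seq_pos merged_corvar_seq core_index out) := by unfold Spec_get_full_seq_pos; infer_instance

-- ===== CLAIM (what is proved, stated in full; the proofs are below) =====
def Claim_equal_get_full_seq_pos : Prop := ∀ (merged_corvar_seq : String) (core_index : Int), Dom_get_full_seq_pos merged_corvar_seq core_index → Pre_get_full_seq_pos merged_corvar_seq core_index → Spec_get_full_seq_pos merged_corvar_seq core_index (get_full_seq_pos merged_corvar_seq core_index)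

-- ===== LEMMAS AND PROOFS =====

-- the lookup B performs, as a function of the index
def lookB (m : List (Option Int)) (i : Int) : Int :=
  if 0 ≤ i ∧ i < (m.length : Int) then
    match m[i.toNat]? with
    | some (some v) => v
    | _ => 0
  else 0

theorem lookB_nil (i : Int) : lookB [] i = 0 := by
  simp [lookB]

theorem lookB_neg (m : List (Option Int)) (i : Int) (h : i < 0) : lookB m i = 0 := by
  unfold lookB
  rw [if_neg (by omega : ¬(0 ≤ i ∧ i < (m.length : Int)))]

theorem lookB_cons (x : Option Int) (m : List (Option Int)) (i : Int) :
    lookB (x :: m) i =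
      if i = 0 then (match x with | some v => v | none => 0)
      else lookB m (i - 1) := by
  unfold lookB
  by_cases h0 : i = 0
  · subst h0
    rw [if_pos rfl, if_pos (by simp)]
    cases x <;> simp
  · rw [if_neg h0]
    have hlen : ((x :: m).length : Int) = (m.length : Int) + 1 := by simp
    by_cases hb : 0 ≤ i - 1 ∧ i - 1 < (m.length : Int)
    · rw [if_pos (show 0 ≤ i ∧ i < ((x :: m).length : Int) by omega), if_pos hb]
      have ht : i.toNat = (i - 1).toNat + 1 := by omega
      rw [ht]
      simp
    · rw [if_neg (show ¬(0 ≤ i ∧ i < ((x :: m).length : Int)) by omega), if_neg hb]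

-- main invariant: A's remaining loop equals B's lookup at index (core - c) into the remaining table
theorem goA_eq_lookB (rest : List Char) (pos c gaps core : Int) :
    goA rest pos c gaps core = lookB (buildMap rest pos gaps) (core - c) := by
  induction rest generalizing pos c gaps with
  | nil => simp [goA, buildMap, lookB_nil]
  | cons r t ih =>
    by_cases hd : r = '-'
    · subst hd
      simp only [goA, buildMap]
      have hl : PySem.Str.islower '-' = false := by decide
      simp only [hl, ne_eq, not_true_eq_false, and_false, if_false, if_true, lookB_cons]
      by_cases h0 : core - c = 0
      · rw [if_pos h0, ih]
        exact lookB_neg _ _ (by omega)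
      · rw [if_neg h0, ih (pos + 1) (c + 1) (gaps + 1)]
        congr 1; omega
    · by_cases hlow : PySem.Str.islower r
      · simp only [goA, buildMap, if_neg hd, hlow, not_true_eq_false, false_and, if_false]
        rw [ih]
      · simp only [goA, buildMap, if_neg hd]
        rw [if_pos ⟨hlow, hd⟩, if_pos hlow, lookB_cons]
        by_cases h0 : core - c = 0
        · rw [if_pos h0, if_pos (show c = core by omega)]
        · rw [if_neg h0, if_neg (show ¬c = core by omega), ih (pos + 1) (c + 1) gaps]
          congr 1; omega

-- ===== VERDICT (by name: the statement is the Claim_ definition above) =====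
theorem get_full_seq_pos_spec : Claim_equal_get_full_seq_pos := by
  intro s core _ _
  show get_full_seq_pos s core = get_full_seq_pos_alt s core
  unfold get_full_seq_pos get_full_seq_pos_alt
  rw [goA_eq_lookB]
  simp only [lookB, sub_zero]
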